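-- pv_equiv track=rewrite | github.com/pokerdio/generic | cf/cf-339e.py | cure
-- ===== SOURCE A (Python) =====
-- def cure(v):
--     ret = [v[0]]
--     for c in v[1:]:
--         if abs(ret[-1][1] - c[0]) == 1:
--             ret[-1] = (ret[-1][0], c[1])
--         else:
--             ret.append(c)
--     return ret
-- ===== SOURCE B (Python) =====
-- def cure(v):
--     # staged: 1) boundary indices, 2) emit one tuple per maximal run
--     cuts = [i for i in range(len(v) - 1) if abs(v[i][1] - v[i + 1][0]) != 1]
--     starts = [0] + [i + 1 for i in cuts]
--     ends = cuts + [len(v) - 1]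
--     return [v[s] if s == e else (v[s][0], v[e][1]) for s, e in zip(starts, ends)]
-- ===== Notes on version B (the rewrite author's own statement) =====
-- stated objective: alternative
-- what changed: A makes a single pass mutating the last emitted tuple in place on every merge; B is two staged passes: it first computes the list of boundary indices where |v[i][1]-v[i+1][0]| != 1, then maps each (start,end) pair of the resulting maximal runs to v[s] (singleton run) or (v[s][0], v[e][1]).
import Mathlib
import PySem

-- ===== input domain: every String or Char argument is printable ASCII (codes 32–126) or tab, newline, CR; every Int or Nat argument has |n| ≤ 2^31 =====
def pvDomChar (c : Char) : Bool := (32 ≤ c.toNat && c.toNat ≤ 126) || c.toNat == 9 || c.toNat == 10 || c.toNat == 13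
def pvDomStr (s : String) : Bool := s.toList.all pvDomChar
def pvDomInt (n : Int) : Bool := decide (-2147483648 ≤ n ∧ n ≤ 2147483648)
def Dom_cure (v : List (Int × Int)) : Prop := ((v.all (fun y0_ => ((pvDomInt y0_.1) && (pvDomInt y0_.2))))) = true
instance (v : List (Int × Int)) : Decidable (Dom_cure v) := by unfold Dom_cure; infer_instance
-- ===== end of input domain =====

-- B replaces A's single mutating pass by two staged passes: first the list of boundary
-- indices between maximal runs, then a map over the (start,end) pairs of the runs
-- (objective: alternative, same O(n) cost).

-- ===== PORT A =====
-- ret is kept REVERSED: the head is Python's ret[-1]; the final .reverse restores order.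
def cureStep (ret : List (Int × Int)) (c : Int × Int) : List (Int × Int) :=
  match ret with
  | last :: rest => if |last.2 - c.1| = 1 then (last.1, c.2) :: rest else c :: last :: rest
  | [] => [c]   -- unreachable: ret starts nonempty and never shrinks

def cure (v : List (Int × Int)) : List (Int × Int) :=
  match v with
  | [] => []   -- Python: v[0] raises IndexError here; excluded by Pre_cure
  | x :: rest => (rest.foldl cureStep [x]).reverse

-- ===== PORT B =====
-- cuts = [i for i in range(len(v)-1) if abs(v[i][1] - v[i+1][0]) != 1]
-- (inside Pre_cure every index used below is in range, so getD's default is never read)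
def cureCuts (v : List (Int × Int)) : List Nat :=
  (List.range (v.length - 1)).filter
    (fun i => decide (|(v.getD i (0, 0)).2 - (v.getD (i + 1) (0, 0)).1| ≠ 1))

-- the comprehension body: v[s] if s == e else (v[s][0], v[e][1])
def cureEmit (v : List (Int × Int)) (p : Nat × Nat) : Int × Int :=
  if p.1 = p.2 then v.getD p.1 (0, 0)
  else ((v.getD p.1 (0, 0)).1, (v.getD p.2 (0, 0)).2)

def cure_alt (v : List (Int × Int)) : List (Int × Int) :=
  let cuts := cureCuts v
  ((0 :: cuts.map (· + 1)).zip (cuts ++ [v.length - 1])).map (cureEmit v)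

-- ===== PRECONDITION & SPEC =====
-- Pre_cure excludes only the empty list, on which both Pythons raise IndexError (v[0]).
def Pre_cure (v : List (Int × Int)) : Prop := v ≠ []
instance (v : List (Int × Int)) : Decidable (Pre_cure v) := by unfold Pre_cure; infer_instance
def pvWitness_cure : (List (Int × Int)) := [(1, 2), (3, 5), (6, 7)]

def Spec_cure (v : List (Int × Int)) (out : List (Int × Int)) : Prop := out = cure_alt v
instance (v : List (Int × Int)) (out : List (Int × Int)) : Decidable (Spec_cure v out) := by unfold Spec_cure; infer_instance

-- ===== CLAIM (what is proved, stated in full; the proofs are below) =====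
def Claim_equal_cure : Prop := ∀ (v : List (Int × Int)), Dom_cure v → Pre_cure v → Spec_cure v (cure v)

-- ===== LEMMAS AND PROOFS =====

-- the common recursive specification: merge head-to-head
def fMerge (x : Int × Int) : List (Int × Int) → List (Int × Int)
  | [] => [x]
  | c :: rest => if |x.2 - c.1| = 1 then fMerge (x.1, c.2) rest else x :: fMerge c rest

theorem cure_eq_fMerge_aux : ∀ (rest acc : List (Int × Int)) (x : Int × Int),
    (List.foldl cureStep (x :: acc) rest).reverse = acc.reverse ++ fMerge x rest := by
  intro rest
  induction rest with
  | nil => intro acc x; simp [fMerge]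
  | cons c rs ih =>
    intro acc x
    simp only [List.foldl_cons, cureStep, fMerge]
    split
    · exact ih acc (x.1, c.2)
    · rw [ih (x :: acc) c]; simp

theorem cure_eq_fMerge (x : Int × Int) (rest : List (Int × Int)) :
    cure (x :: rest) = fMerge x rest := by
  simpa using cure_eq_fMerge_aux rest [] x

-- shifting both indices past a fresh head element
theorem cureEmit_shift (a : Int × Int) (w : List (Int × Int)) (s e : Nat) :
    cureEmit (a :: w) (s + 1, e + 1) = cureEmit w (s, e) := by
  simp [cureEmit]

theorem shift_zip_map (v0 : Int × Int) (w : List (Int × Int)) (l1 l2 : List Nat) :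
    List.map (cureEmit (v0 :: w)) ((l1.map (· + 1)).zip (l2.map (· + 1))) =
      List.map (cureEmit w) (l1.zip l2) := by
  rw [List.zip_map, List.map_map]
  exact List.map_congr_left (fun p _ => cureEmit_shift v0 w p.1 p.2)

-- only the second component of the head enters any .2-projection
theorem getD_snd_congr (a b : Int × Int) (w : List (Int × Int)) (h : a.2 = b.2) (i : Nat) :
    ((a :: w)[i]?.getD (0, 0)).2 = ((b :: w)[i]?.getD (0, 0)).2 := by
  cases i <;> simp [h]

theorem cureCuts_snd_congr (a b : Int × Int) (w : List (Int × Int)) (h : a.2 = b.2) :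
    cureCuts (a :: w) = cureCuts (b :: w) := by
  unfold cureCuts
  refine List.filter_congr ?_
  intro i _
  cases i <;> simp [h]

theorem cureCuts_cons (a b : Int × Int) (w : List (Int × Int)) :
    cureCuts (a :: b :: w) =
      (if |a.2 - b.1| ≠ 1 then [0] else []) ++ (cureCuts (b :: w)).map (· + 1) := by
  unfold cureCuts
  simp only [List.length_cons]
  rw [show w.length + 1 + 1 - 1 = w.length + 1 from rfl,
      show w.length + 1 - 1 = w.length from rfl,
      List.range_succ_eq_map, List.filter_cons, List.filter_map]
  split_ifs <;> simp_all [Function.comp_def] <;> rfl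

-- emit agrees on two lists differing only in the head's first component, at s >= 1
theorem cureEmit_agree (a b : Int × Int) (w : List (Int × Int)) (h : a.2 = b.2)
    (s e : Nat) (hs : 1 ≤ s) :
    cureEmit (a :: w) (s, e) = cureEmit (b :: w) (s, e) := by
  obtain ⟨s', rfl⟩ : ∃ s', s = s' + 1 := ⟨s - 1, by omega⟩
  unfold cureEmit
  split
  · simp
  · simp [getD_snd_congr a b w h e]

theorem alt_eq_fMerge : ∀ (rs : List (Int × Int)) (x : Int × Int),
    cure_alt (x :: rs) = fMerge x rs := by
  intro rs
  induction rs with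
  | nil => intro x; simp [cure_alt, cureCuts, cureEmit, fMerge]
  | cons c rest ih =>
    intro x
    show cure_alt (x :: c :: rest) = fMerge x (c :: rest)
    unfold fMerge
    by_cases h : |x.2 - c.1| = 1
    · -- merge case: cure_alt (x :: c :: rest) = cure_alt ((x.1, c.2) :: rest)
      rw [if_pos h, ← ih (x.1, c.2)]
      have hc1 : cureCuts (x :: c :: rest) = (cureCuts (c :: rest)).map (· + 1) := by
        rw [cureCuts_cons]; simp [h]
      have hc2 : cureCuts ((x.1, c.2) :: rest) = cureCuts (c :: rest) :=
        cureCuts_snd_congr _ c rest rfl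
      set C := cureCuts (c :: rest) with hC
      unfold cure_alt
      rw [hc1, hc2]
      simp only [List.length_cons]
      rw [show rest.length + 1 + 1 - 1 = rest.length + 1 from rfl,
          show rest.length + 1 - 1 = rest.length from rfl]
      have happ : (C.map (· + 1)) ++ [rest.length + 1] = (C ++ [rest.length]).map (· + 1) := by
        simp
      obtain ⟨e0, t, hE⟩ : ∃ e0 t, C ++ [rest.length] = e0 :: t := by
        cases C with
        | nil => exact ⟨_, _, rfl⟩
        | cons a l => exact ⟨_, _, rfl⟩
      rw [happ, hE]
      simp only [List.map_cons, List.zip_cons_cons, List.map_cons]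
      rw [List.cons_eq_cons]
      constructor
      · -- heads: cureEmit (x::c::rest) (0, e0+1) = cureEmit ((x.1,c.2)::rest) (0, e0)
        cases e0 <;> simp [cureEmit]
      · -- tails
        rw [shift_zip_map x (c :: rest) (C.map (· + 1)) t]
        refine List.map_congr_left ?_
        intro p hp
        have hs : p.1 ∈ C.map (· + 1) := (List.of_mem_zip (a := p.1) (b := p.2) hp).1
        obtain ⟨s', _, hs'⟩ := List.mem_map.mp hs
        exact cureEmit_agree c (x.1, c.2) rest rfl p.1 p.2 (by omega)
    · -- no-merge case: cure_alt (x :: c :: rest) = x :: cure_alt (c :: rest)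
      rw [if_neg h, ← ih c]
      have hc1 : cureCuts (x :: c :: rest) = 0 :: (cureCuts (c :: rest)).map (· + 1) := by
        rw [cureCuts_cons]; simp [h]
      set C := cureCuts (c :: rest) with hC
      unfold cure_alt
      rw [hc1]
      simp only [List.length_cons]
      rw [show rest.length + 1 + 1 - 1 = rest.length + 1 from rfl,
          show rest.length + 1 - 1 = rest.length from rfl]
      have happ : (C.map (· + 1)) ++ [rest.length + 1] = (C ++ [rest.length]).map (· + 1) := by
        simp
      simp only [List.map_cons, List.cons_append, List.zip_cons_cons, List.map_cons]
      rw [happ, List.cons_eq_cons]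
      constructor
      · simp [cureEmit]
      · have hm : (0 + 1) :: (C.map (· + 1)).map (· + 1) = (0 :: C.map (· + 1)).map (· + 1) := by
          simp
        rw [hm, shift_zip_map x (c :: rest) (0 :: C.map (· + 1)) (C ++ [rest.length])]

-- ===== VERDICT (by name: the statement is the Claim_ definition above) =====
theorem cure_spec : Claim_equal_cure := by
  intro v _ hpre
  unfold Spec_cure
  cases v with
  | nil => exact absurd rfl hpre
  | cons x rs => rw [cure_eq_fMerge, alt_eq_fMerge]
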